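-- pv_equiv track=rewrite | github.com/cirosantilli/project-euler-solvers | solvers/98.py | pattern_signature
-- ===== SOURCE A (Python) =====
-- from typing import Dict, Iterable, List, Optional, Set, Tuple
--
-- def pattern_signature(s: str) -> Tuple[int, ...]:
--     """Encode equality structure, e.g. NOON -> (0,1,1,0), CARE -> (0,1,2,3)."""
--     mp: Dict[str, int] = {}
--     out: List[int] = []
--     nxt = 0
--     for ch in s:
--         if ch not in mp:
--             mp[ch] = nxt
--             nxt += 1
--         out.append(mp[ch])
--     return tuple(out)
-- ===== SOURCE B (Python) =====
-- def pattern_signature(s: str):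
--     """Closed characterization: the id of a character is the number of distinct
--     characters occurring strictly before its first occurrence, so
--     id(ch) = len(set(s[:s.index(ch)])) -- no dict, no counter, no seen list."""
--     return tuple(len(set(s[:s.index(ch)])) for ch in s)
-- ===== Notes on version B (the rewrite author's own statement) =====
-- stated objective: alternative
-- what changed: Replaced A's stateful dict-and-counter loop by a stateless closed formula per character: id(ch) = len(set(s[:s.index(ch)])), the number of distinct characters strictly before ch's first occurrence.
import Mathlib
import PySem

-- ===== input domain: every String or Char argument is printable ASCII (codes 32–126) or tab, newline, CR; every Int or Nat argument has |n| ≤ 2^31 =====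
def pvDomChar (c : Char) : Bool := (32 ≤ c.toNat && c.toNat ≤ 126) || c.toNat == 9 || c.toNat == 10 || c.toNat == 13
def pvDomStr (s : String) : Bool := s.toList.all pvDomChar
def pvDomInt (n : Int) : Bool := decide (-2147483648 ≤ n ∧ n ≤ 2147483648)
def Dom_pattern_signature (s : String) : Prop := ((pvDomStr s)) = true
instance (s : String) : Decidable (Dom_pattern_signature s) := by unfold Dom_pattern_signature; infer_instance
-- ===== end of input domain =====

-- B replaces A's stateful dict-and-counter loop by a closed per-character formula:
-- the id of a character is the number of distinct characters strictly before its
-- first occurrence, len(set(s[:s.index(ch)])) (objective: simpler, no state at all).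

-- ===== PORT A =====
-- one loop step of A: maybe register ch in mp (with counter nxt), then emit mp[ch]
def pvStepA (st : PySem.Dict Char Int × List Int × Int) (ch : Char) :
    PySem.Dict Char Int × List Int × Int :=
  let mp := st.1
  let out := st.2.1
  let nxt := st.2.2
  if mp.contains ch = false then
    ((mp.insert ch nxt), out ++ [(mp.insert ch nxt).getD ch 0], nxt + 1)
  else
    (mp, out ++ [mp.getD ch 0], nxt)

def pattern_signature (s : String) : List Int :=
  (s.toList.foldl pvStepA (PySem.Dict.empty, ([] : List Int), (0 : Int))).2.1

-- ===== PORT B =====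
-- tuple(len(set(s[:s.index(ch)])) for ch in s); ch always occurs in s, so
-- s.index(ch) never raises — ported as (index? …).getD 0 (the default unreachable).
def pattern_signature_alt (s : String) : List Int :=
  s.toList.map (fun ch =>
    Int.ofNat (PySem.Set.ofList
      (PySem.List.slice s.toList none
        (some (((PySem.List.index? s.toList ch).getD 0 : Nat) : Int)))).length)

-- ===== PRECONDITION & SPEC =====
def Spec_pattern_signature (s : String) (out : List Int) : Prop := out = pattern_signature_alt s
instance (s : String) (out : List Int) : Decidable (Spec_pattern_signature s out) := by unfold Spec_pattern_signature; infer_instance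

-- ===== CLAIM (what is proved, stated in full; the proofs are below) =====
def Claim_equal_pattern_signature : Prop := ∀ (s : String), Dom_pattern_signature s → Spec_pattern_signature s (pattern_signature s)

-- ===== LEMMAS AND PROOFS =====

-- B's closed formula on the list side
def pvF (full : List Char) (c : Char) : Int :=
  Int.ofNat (PySem.Set.ofList (full.take ((PySem.List.index? full c).getD 0))).length

-- for c ∉ p, the first occurrence of c in p ++ c :: t is at index p.length
theorem pvIndex_mid (p t : List Char) (c : Char) (h : c ∉ p) :
    PySem.List.index? (p ++ c :: t) c = some p.length :=
  (PySem.List.index?_eq_some_iff _ _ _).mpr ⟨p, t, rfl, rfl, h⟩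

-- so pvF of a fresh character is the number of distinct characters already seen
theorem pvF_fresh (p t : List Char) (c : Char) (h : c ∉ p) :
    pvF (p ++ c :: t) c = ((PySem.Set.ofList p).length : Int) := by
  unfold pvF
  rw [pvIndex_mid p t c h]
  simp

-- main invariant: if mp's lookups agree with pvF on the processed prefix p
-- (and the counter is the number of distinct chars of p), A's fold emits pvF
theorem pvMain (full : List Char) : ∀ (l p : List Char) (mp : PySem.Dict Char Int) (out : List Int),
    full = p ++ l →
    (∀ c, mp.get? c = if c ∈ p then some (pvF full c) else none) →
    (l.foldl pvStepA (mp, out, ((PySem.Set.ofList p).length : Int))).2.1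
      = out ++ l.map (pvF full) := by
  intro l
  induction l with
  | nil => intro p mp out _ _; simp
  | cons ch t ih =>
    intro p mp out hfull H
    by_cases h : ch ∈ p
    · have hget : mp.get? ch = some (pvF full ch) := by rw [H ch]; simp [h]
      have hcont : mp.contains ch = true := by
        rw [PySem.Dict.contains_eq_isSome_get?, hget]; rfl
      have hgd : mp.getD ch 0 = pvF full ch := PySem.Dict.getD_of_get?_eq_some mp 0 hget
      have hset : PySem.Set.ofList (p ++ [ch]) = PySem.Set.ofList p := by
        rw [PySem.Set.ofList_append_singleton]
        simp [PySem.Set.add, PySem.Set.contains, PySem.Set.mem_ofList, h]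
      have hH' : ∀ c, mp.get? c = if c ∈ p ++ [ch] then some (pvF full c) else none := by
        intro c; rw [H c]
        by_cases hc : c = ch
        · simp [hc, h]
        · simp [hc]
      simp only [List.foldl_cons, pvStepA, hcont, Bool.true_eq_false, reduceIte, hgd]
      rw [← hset, ih (p ++ [ch]) mp (out ++ [pvF full ch]) (by simp [hfull]) hH']
      simp
    · have hget : mp.get? ch = none := by rw [H ch]; simp [h]
      have hcont : mp.contains ch = false := by
        rw [PySem.Dict.contains_eq_isSome_get?, hget]; rfl
      have hful : full = p ++ ch :: t := hfull
      have hval : pvF full ch = ((PySem.Set.ofList p).length : Int) := by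
        rw [hful]; exact pvF_fresh p t ch h
      have hgd : (mp.insert ch ((PySem.Set.ofList p).length : Int)).getD ch 0
          = ((PySem.Set.ofList p).length : Int) := by
        simp [PySem.Dict.getD_insert_self]
      have hset : PySem.Set.ofList (p ++ [ch]) = PySem.Set.ofList p ++ [ch] := by
        rw [PySem.Set.ofList_append_singleton]
        simp [PySem.Set.add, PySem.Set.contains, PySem.Set.mem_ofList, h]
      have hlen : ((PySem.Set.ofList p).length : Int) + 1
          = ((PySem.Set.ofList (p ++ [ch])).length : Int) := by
        rw [hset]; simp
      have hH' : ∀ c, (mp.insert ch ((PySem.Set.ofList p).length : Int)).get? c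
          = if c ∈ p ++ [ch] then some (pvF full c) else none := by
        intro c
        by_cases hc : c = ch
        · subst hc
          rw [PySem.Dict.get?_insert_self, hval]; simp
        · rw [PySem.Dict.get?_insert_of_ne mp _ hc, H c]
          simp [hc]
      simp only [List.foldl_cons, pvStepA, hcont, reduceIte, hgd]
      rw [hlen, ih (p ++ [ch]) _ (out ++ [((PySem.Set.ofList p).length : Int)])
        (by simp [hfull]) hH']
      rw [List.map_cons, ← hval]
      simp

-- ===== VERDICT (by name: the statement is the Claim_ definition above) =====
theorem pattern_signature_spec : Claim_equal_pattern_signature := by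
  intro s _
  unfold Spec_pattern_signature pattern_signature pattern_signature_alt
  have hm : ∀ c, (PySem.Dict.empty : PySem.Dict Char Int).get? c
      = if c ∈ ([] : List Char) then some (pvF s.toList c) else none := by
    intro c; simp
  have := pvMain s.toList s.toList [] PySem.Dict.empty [] (by simp) hm
  have h0 : (((PySem.Set.ofList ([] : List Char)).length : Nat) : Int) = 0 := rfl
  rw [h0] at this
  rw [this]
  apply List.map_congr_left
  intro ch _
  rw [PySem.List.slice_to_natCast]
  rfl
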